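-- pv_equiv track=rewrite | github.com/mikekulinski/DailyCodingChallenge | day21.py | get_classrooms
-- ===== SOURCE A (Python) =====
-- def get_classrooms(time_intervals):
--     classrooms = []
--     seen = {}
--     while time_intervals:
--         classroom = fill_classroom(time_intervals)
--         classrooms.append(classroom)
--
--         remaining_intervals = []
--         for time in time_intervals:
--             if time not in classroom:
--                 remaining_intervals.append(time)
--
--         time_intervals = remaining_intervals
--
--     return classrooms
--
-- def fill_classroom(time_intervals):
--     classroom = []
--     time_intervals = sorted(time_intervals, key= lambda x: x[1])
--     while time_intervals:
--         current = time_intervals.pop(0)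
--         classroom.append(current)
--
--         time_intervals = [x for x in time_intervals if not overlaps(current, x)]
--
--     return classroom
--
-- def overlaps(interval1, interval2):
--     if interval1[0] <= interval2[1] and interval2[0] <= interval1[1]:
--         return True
--     return False
-- ===== SOURCE B (Python) =====
-- def get_classrooms(time_intervals):
--     classrooms = []
--     while time_intervals:
--         classroom = []
--         for x in sorted(time_intervals, key=lambda t: t[1]):
--             if all(not (c[0] <= x[1] and x[0] <= c[1]) for c in classroom):
--                 classroom.append(x)
--         classrooms.append(classroom)
--         time_intervals = [t for t in time_intervals if t not in classroom]
--     return classrooms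
-- ===== Notes on version B (the rewrite author's own statement) =====
-- stated objective: alternative
-- what changed: Each classroom is filled by ONE left-to-right pass over the end-sorted list that accepts an interval iff it overlaps no interval accepted so far, instead of A's repeated pop(0) plus rebuilding the whole remaining list by a filtering comprehension after every accepted interval.
import Mathlib
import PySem

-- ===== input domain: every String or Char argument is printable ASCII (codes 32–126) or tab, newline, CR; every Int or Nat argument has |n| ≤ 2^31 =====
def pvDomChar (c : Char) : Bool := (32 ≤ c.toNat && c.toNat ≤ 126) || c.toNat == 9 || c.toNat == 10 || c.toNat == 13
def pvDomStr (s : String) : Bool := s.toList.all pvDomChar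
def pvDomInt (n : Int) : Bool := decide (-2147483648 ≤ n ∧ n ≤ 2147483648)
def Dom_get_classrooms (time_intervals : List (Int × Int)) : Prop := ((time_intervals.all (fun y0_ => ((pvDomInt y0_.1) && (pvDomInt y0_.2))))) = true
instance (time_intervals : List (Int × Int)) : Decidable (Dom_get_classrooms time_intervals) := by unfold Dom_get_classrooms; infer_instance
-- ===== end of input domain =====

-- B fills each classroom in one pass over the end-sorted list (accept iff no overlap with the
-- intervals accepted so far) instead of A's pop(0)+refilter loop; same return value, objective: alternative.

-- ===== PORT A =====
-- overlaps(interval1, interval2)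
def pvOverlaps (a b : Int × Int) : Bool := a.1 ≤ b.2 && b.1 ≤ a.2

-- the while-loop of fill_classroom: pop the first, append, filter out overlapping;
-- fuel = list length only makes the loop total (each step strictly shrinks the list)
def pvFillLoop : Nat → List (Int × Int) → List (Int × Int) → List (Int × Int)
  | _, classroom, [] => classroom
  | 0, classroom, _ => classroom
  | n + 1, classroom, c :: rest =>
      pvFillLoop n (classroom ++ [c]) (rest.filter (fun x => !pvOverlaps c x))

def pvFillClassroom (time_intervals : List (Int × Int)) : List (Int × Int) :=
  pvFillLoop time_intervals.length [] (PySem.List.sorted time_intervals (fun x => x.2) false)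

-- the outer while-loop of get_classrooms; fuel = length + 1 only makes the loop total,
-- each nonempty iteration strictly shrinks the list so the fuel never runs out
def pvGoA : Nat → List (Int × Int) → List (List (Int × Int))
  | 0, _ => []
  | _ + 1, [] => []
  | n + 1, time_intervals =>
      let classroom := pvFillClassroom time_intervals
      let remaining := time_intervals.foldl
        (fun acc time => if !classroom.contains time then acc ++ [time] else acc) []
      classroom :: pvGoA n remaining

def get_classrooms (time_intervals : List (Int × Int)) : List (List (Int × Int)) :=
  pvGoA (time_intervals.length + 1) time_intervals

-- ===== PORT B =====
-- one pass: accept x iff it overlaps nothing accepted so far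
def pvStepB (classroom : List (Int × Int)) (x : Int × Int) : List (Int × Int) :=
  if classroom.all (fun c => !(c.1 ≤ x.2 && x.1 ≤ c.2)) then classroom ++ [x] else classroom

def pvFillAlt (time_intervals : List (Int × Int)) : List (Int × Int) :=
  (PySem.List.sorted time_intervals (fun x => x.2) false).foldl pvStepB []

def pvGoB : Nat → List (Int × Int) → List (List (Int × Int))
  | 0, _ => []
  | _ + 1, [] => []
  | n + 1, time_intervals =>
      let classroom := pvFillAlt time_intervals
      classroom :: pvGoB n (time_intervals.filter (fun t => !classroom.contains t))

def get_classrooms_alt (time_intervals : List (Int × Int)) : List (List (Int × Int)) :=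
  pvGoB (time_intervals.length + 1) time_intervals

-- ===== PRECONDITION & SPEC =====
def Spec_get_classrooms (time_intervals : List (Int × Int)) (out : List (List (Int × Int))) : Prop := out = get_classrooms_alt time_intervals
instance (time_intervals : List (Int × Int)) (out : List (List (Int × Int))) : Decidable (Spec_get_classrooms time_intervals out) := by unfold Spec_get_classrooms; infer_instance

-- ===== CLAIM (what is proved, stated in full; the proofs are below) =====
def Claim_equal_get_classrooms : Prop := ∀ (time_intervals : List (Int × Int)), Dom_get_classrooms time_intervals → Spec_get_classrooms time_intervals (get_classrooms time_intervals)

-- ===== LEMMAS AND PROOFS =====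

-- elements rejected because they overlap some already-accepted c may be pre-filtered away
lemma mem_stepB {c x : Int × Int} {acc : List (Int × Int)} (hc : c ∈ acc) :
    c ∈ pvStepB acc x := by
  unfold pvStepB; split <;> simp [hc]

lemma foldl_stepB_filter (c : Int × Int) :
    ∀ (l acc : List (Int × Int)), c ∈ acc →
      List.foldl pvStepB acc (l.filter (fun x => !pvOverlaps c x)) = List.foldl pvStepB acc l := by
  intro l
  induction l with
  | nil => intro acc _; rfl
  | cons x rest ih =>
    intro acc hc
    by_cases hov : pvOverlaps c x = true
    · have hstep : pvStepB acc x = acc := by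
        unfold pvStepB
        rw [if_neg]
        intro hall
        have h1 := List.all_eq_true.mp hall c hc
        simp [pvOverlaps] at hov h1
        omega
      have hf : (x :: rest).filter (fun y => !pvOverlaps c y) =
          rest.filter (fun y => !pvOverlaps c y) := by
        simp [hov]
      rw [hf, ih acc hc, List.foldl_cons, hstep]
    · have hov' : pvOverlaps c x = false := by simpa using hov
      have hf : (x :: rest).filter (fun y => !pvOverlaps c y) =
          x :: rest.filter (fun y => !pvOverlaps c y) := by
        simp [hov']
      rw [hf, List.foldl_cons, List.foldl_cons]
      exact ih (pvStepB acc x) (mem_stepB hc)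

-- A's fill loop equals B's single fold, provided nothing pending overlaps the accumulator
lemma fillLoop_eq_foldl :
    ∀ (n : Nat) (acc l : List (Int × Int)), l.length ≤ n →
      (∀ x ∈ l, ∀ c ∈ acc, pvOverlaps c x = false) →
      pvFillLoop n acc l = List.foldl pvStepB acc l := by
  intro n
  induction n with
  | zero =>
    intro acc l hlen _
    have : l = [] := List.length_eq_zero_iff.mp (Nat.le_zero.mp hlen)
    subst this; rfl
  | succ m ih =>
    intro acc l hlen h
    cases l with
    | nil => rfl
    | cons c rest =>
      have hstep : pvStepB acc c = acc ++ [c] := by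
        unfold pvStepB
        rw [if_pos]
        refine List.all_eq_true.mpr ?_
        intro c' hc'
        have := h c (by simp) c' hc'
        simp [pvOverlaps] at this ⊢
        omega
      have hrec : pvFillLoop m (acc ++ [c]) (rest.filter (fun x => !pvOverlaps c x)) =
          List.foldl pvStepB (acc ++ [c]) (rest.filter (fun x => !pvOverlaps c x)) := by
        apply ih
        · exact le_trans (List.length_filter_le _ _) (by simpa using Nat.lt_succ_iff.mp (by simpa using hlen))
        · intro x hx c' hc'
          have hx' := List.mem_filter.mp hx
          rcases List.mem_append.mp hc' with h1 | h2
          · exact h x (by simp [hx'.1]) c' h1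
          · have : c' = c := by simpa using h2
            subst this
            simpa using hx'.2
      rw [pvFillLoop, hrec, foldl_stepB_filter c rest (acc ++ [c]) (by simp),
        List.foldl_cons, hstep]

lemma fill_eq (l : List (Int × Int)) : pvFillClassroom l = pvFillAlt l := by
  unfold pvFillClassroom pvFillAlt
  exact fillLoop_eq_foldl l.length [] _ (by simp [PySem.List.length_sorted])
    (by intro x _ c hc; simp at hc)

lemma goA_eq_goB : ∀ (n : Nat) (l : List (Int × Int)), pvGoA n l = pvGoB n l := by
  intro n
  induction n with
  | zero => intro l; rfl
  | succ m ih =>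
    intro l
    cases l with
    | nil => rfl
    | cons a t =>
      rw [pvGoA, pvGoB]
      · simp only [fill_eq]
        rw [PySem.List.foldl_append_if_eq_filter]
        simp only [List.nil_append]
        rw [ih]
      all_goals intro h; cases h

-- ===== VERDICT (by name: the statement is the Claim_ definition above) =====
theorem get_classrooms_spec : Claim_equal_get_classrooms := by
  intro l _
  unfold Spec_get_classrooms get_classrooms get_classrooms_alt
  exact goA_eq_goB _ _
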